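-- pv_equiv track=rewrite | github.com/chdb-io/chdb | datastore/connection.py | _add_row_id_to_all_selects
-- ===== SOURCE A (Python) =====
-- def _add_row_id_to_all_selects(sql: str) -> str:
--     """
--     Add _row_id to all SELECT clauses in the SQL.
--
--     This is necessary because _row_id is a virtual column that's only
--     available on Python() table function, and SELECT * doesn't include it.
--     We need to explicitly select it at every level for it to be available
--     in outer queries.
--     """
--     # Find all FROM positions that are at valid SQL boundaries (not inside quoted strings)
--     # and add _row_id before each one
--     result = []
--     i = 0
--     sql_len = len(sql)
--
--     while i < sql_len:
--         # Track if we're inside a quoted string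
--         if sql[i] == '"':
--             # Find closing quote
--             end = sql.find('"', i + 1)
--             if end == -1:
--                 result.append(sql[i:])
--                 break
--             result.append(sql[i : end + 1])
--             i = end + 1
--             continue
--         elif sql[i] == "'":
--             # Find closing quote
--             end = sql.find("'", i + 1)
--             if end == -1:
--                 result.append(sql[i:])
--                 break
--             result.append(sql[i : end + 1])
--             i = end + 1
--             continue
--
--         # Check if we're at a FROM keyword (case-insensitive)
--         upper_remaining = sql[i:].upper()
--         if upper_remaining.startswith('FROM') and (i == 0 or not sql[i - 1].isalnum() and sql[i - 1] != '_'):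
--             # Check if FROM is followed by a non-alphanumeric character (word boundary)
--             after_from = i + 4
--             if after_from >= sql_len or (not sql[after_from].isalnum() and sql[after_from] != '_'):
--                 # This is a valid FROM keyword
--                 # Check the preceding content for _row_id
--                 preceding = ''.join(result)
--
--                 # Find the last SELECT before this FROM
--                 select_pos = preceding.upper().rfind('SELECT')
--                 if select_pos != -1:
--                     # Check if _row_id is already in this SELECT clause
--                     select_clause = preceding[select_pos:]
--                     if '_row_id' not in select_clause.lower():
--                         # Add _row_id before FROM
--                         # Remove trailing whitespace and add _row_id
--                         while result and result[-1].isspace():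
--                             result.pop()
--                         result.append(', _row_id ')
--
--                 result.append(sql[i : i + 4])  # Add FROM
--                 i = i + 4
--                 continue
--
--         result.append(sql[i])
--         i += 1
--
--     return ''.join(result)
-- ===== SOURCE B (Python) =====
-- def _add_row_id_to_all_selects(sql: str) -> str:
--     """Single left-to-right pass: the output is kept as a list of characters and
--     the SELECT / _row_id bookkeeping is updated incrementally (constant-size
--     suffix checks per appended character) instead of re-joining, re-uppercasing
--     and re-scanning the accumulated prefix at every FROM keyword."""
--     out = []            # output characters
--     sel = False         # some SELECT occurrence has been completed in out
--     row = False         # a _row_id occurrence completed after the last SELECT one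
--
--     def feed(c):
--         nonlocal sel, row
--         out.append(c)
--         if ''.join(out[-6:]).upper() == 'SELECT':
--             sel, row = True, False
--         elif ''.join(out[-7:]).lower() == '_row_id':
--             row = True
--
--     i = 0
--     n = len(sql)
--     while i < n:
--         ch = sql[i]
--         if ch == '"' or ch == "'":
--             end = sql.find(ch, i + 1)
--             if end == -1:
--                 for c in sql[i:]:
--                     feed(c)
--                 break
--             for c in sql[i:end + 1]:
--                 feed(c)
--             i = end + 1
--             continue
--         if sql[i:i + 4].upper() == 'FROM' and (i == 0 or not (sql[i - 1].isalnum() or sql[i - 1] == '_')):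
--             j = i + 4
--             if j >= n or not (sql[j].isalnum() or sql[j] == '_'):
--                 if sel and not row:
--                     while out and out[-1].isspace():
--                         out.pop()
--                     for c in ', _row_id ':
--                         feed(c)
--                 for c in sql[i:j]:
--                     feed(c)
--                 i = j
--                 continue
--         feed(ch)
--         i += 1
--     return ''.join(out)
-- ===== Notes on version B (the rewrite author's own statement) =====
-- stated objective: faster
-- what changed: Instead of re-joining the accumulated fragments and re-scanning them (rfind SELECT, substring search, plus sql[i:].upper()) at every FROM keyword, B keeps the output as a char list and maintains the 'a SELECT was seen' / '_row_id seen after the last SELECT' facts incrementally with constant-size suffix checks per appended character.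
import Mathlib
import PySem

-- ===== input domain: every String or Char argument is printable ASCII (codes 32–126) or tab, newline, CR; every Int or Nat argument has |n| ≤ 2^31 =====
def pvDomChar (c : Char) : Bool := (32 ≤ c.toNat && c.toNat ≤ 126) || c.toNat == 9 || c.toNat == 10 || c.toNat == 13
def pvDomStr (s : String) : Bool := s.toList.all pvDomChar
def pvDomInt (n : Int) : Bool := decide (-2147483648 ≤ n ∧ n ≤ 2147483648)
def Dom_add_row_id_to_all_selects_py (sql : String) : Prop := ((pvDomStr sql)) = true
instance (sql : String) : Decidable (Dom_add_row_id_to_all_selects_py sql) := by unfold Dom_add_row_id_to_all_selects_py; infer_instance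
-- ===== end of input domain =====

-- B replaces A's per-FROM re-join / re-uppercase / rescan of the accumulated output by a single pass with
-- incrementally maintained SELECT/_row_id flags (constant-size suffix checks); measured asymptotically faster.

-- 'SELECT' as chars
def pvSEL : List Char := ['S', 'E', 'L', 'E', 'C', 'T']
-- '_row_id' as chars
def pvROW : List Char := ['_', 'r', 'o', 'w', '_', 'i', 'd']
-- ', _row_id ' as chars
def pvMARK : List Char := [',', ' ', '_', 'r', 'o', 'w', '_', 'i', 'd', ' ']
-- 'FROM' as chars
def pvFROM : List Char := ['F', 'R', 'O', 'M']

-- ===== PORT A =====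
-- Python: while result and result[-1].isspace(): result.pop()   (pop from the end = drop from the reverse)
def popWsToksRev : List (List Char) → List (List Char)
  | [] => []
  | t :: r => if PySem.Chars.strIsspace t then popWsToksRev r else t :: r

def popWsToks (r : List (List Char)) : List (List Char) := (popWsToksRev r.reverse).reverse

-- the while-loop of A; i is the scan position, result the list of appended string fragments
-- (fuel = an upper bound on the remaining iterations, sql.length - i at every call; each
-- iteration advances i by at least 1, so the 0-fuel case is never reached while i < len(sql))
def loopA (sql : List Char) : Nat → Nat → List (List Char) → List (List Char)
  | 0, _, result => result
  | fuel + 1, i, result =>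
    if hi : i < sql.length then
      if sql[i] = '"' then
        let e := PySem.Chars.findFrom sql ['"'] ((i : Int) + 1)
        if e = -1 then result ++ [PySem.List.slice sql (some (i : Int)) none]
        else loopA sql fuel (e.toNat + 1) (result ++ [PySem.List.slice sql (some (i : Int)) (some (e + 1))])
      else if sql[i] = '\'' then
        let e := PySem.Chars.findFrom sql ['\''] ((i : Int) + 1)
        if e = -1 then result ++ [PySem.List.slice sql (some (i : Int)) none]
        else loopA sql fuel (e.toNat + 1) (result ++ [PySem.List.slice sql (some (i : Int)) (some (e + 1))])
      else
        if PySem.Chars.startswith (PySem.Chars.upper (PySem.List.slice sql (some (i : Int)) none)) pvFROM = true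
            ∧ (i = 0 ∨ (¬ PySem.Chars.isalnum (sql.getD (i - 1) ' ') = true ∧ sql.getD (i - 1) ' ' ≠ '_')) then
          if sql.length ≤ i + 4
              ∨ (¬ PySem.Chars.isalnum (sql.getD (i + 4) ' ') = true ∧ sql.getD (i + 4) ' ' ≠ '_') then
            let preceding := PySem.Chars.join [] result
            let sp := PySem.Chars.rfind (PySem.Chars.upper preceding) pvSEL
            let result1 :=
              if sp ≠ -1 then
                if ¬ PySem.Chars.isIn pvROW
                      (PySem.Chars.lower (PySem.List.slice preceding (some sp) none)) = true then
                  popWsToks result ++ [pvMARK]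
                else result
              else result
            loopA sql fuel (i + 4) (result1 ++ [PySem.List.slice sql (some (i : Int)) (some ((i : Int) + 4))])
          else loopA sql fuel (i + 1) (result ++ [[sql[i]]])
        else loopA sql fuel (i + 1) (result ++ [[sql[i]]])
    else result

def add_row_id_to_all_selects_py (sql : String) : String :=
  String.ofList (PySem.Chars.join [] (loopA sql.toList sql.toList.length 0 []))

-- ===== PORT B =====
-- feed(c) of Source B: append c to out and update the two flags by constant-size suffix checks
def feedB (st : List Char × Bool × Bool) (c : Char) : List Char × Bool × Bool :=
  let out := st.1 ++ [c]
  if PySem.Chars.upper (PySem.List.slice out (some (-6 : Int)) none) = pvSEL then (out, true, false)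
  else if PySem.Chars.lower (PySem.List.slice out (some (-7 : Int)) none) = pvROW then (out, st.2.1, true)
  else (out, st.2.1, st.2.2)

-- Python: while out and out[-1].isspace(): out.pop()
def popChars (out : List Char) : List Char := (out.reverse.dropWhile PySem.Chars.isspace).reverse

-- the while-loop of Source B; state = (out, sel, row); fuel as in loopA
def loopB (sql : List Char) : Nat → Nat → List Char × Bool × Bool → List Char
  | 0, _, st => st.1
  | fuel + 1, i, st =>
    if hi : i < sql.length then
      let c := sql[i]
      if c = '"' ∨ c = '\'' then
        let e := PySem.Chars.findFrom sql [c] ((i : Int) + 1)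
        if e = -1 then ((PySem.List.slice sql (some (i : Int)) none).foldl feedB st).1
        else loopB sql fuel (e.toNat + 1) ((PySem.List.slice sql (some (i : Int)) (some (e + 1))).foldl feedB st)
      else if PySem.Chars.upper (PySem.List.slice sql (some (i : Int)) (some ((i : Int) + 4))) = pvFROM
          ∧ (i = 0 ∨ ¬ (PySem.Chars.isalnum (sql.getD (i - 1) ' ') = true ∨ sql.getD (i - 1) ' ' = '_')) then
        if sql.length ≤ i + 4
            ∨ ¬ (PySem.Chars.isalnum (sql.getD (i + 4) ' ') = true ∨ sql.getD (i + 4) ' ' = '_') then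
          let st1 :=
            if st.2.1 = true ∧ ¬ st.2.2 = true then
              pvMARK.foldl feedB (popChars st.1, st.2.1, st.2.2)
            else st
          loopB sql fuel (i + 4) ((PySem.List.slice sql (some (i : Int)) (some ((i : Int) + 4))).foldl feedB st1)
        else loopB sql fuel (i + 1) (feedB st c)
      else loopB sql fuel (i + 1) (feedB st c)
    else st.1

def add_row_id_to_all_selects_py_alt (sql : String) : String :=
  String.ofList (loopB sql.toList sql.toList.length 0 ([], false, false))

-- ===== PRECONDITION & SPEC =====
def Spec_add_row_id_to_all_selects_py (sql : String) (out : String) : Prop := out = add_row_id_to_all_selects_py_alt sql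
instance (sql : String) (out : String) : Decidable (Spec_add_row_id_to_all_selects_py sql out) := by unfold Spec_add_row_id_to_all_selects_py; infer_instance

-- ===== CLAIM (what is proved, stated in full; the proofs are below) =====
def Claim_equal_add_row_id_to_all_selects_py : Prop := ∀ (sql : String), Dom_add_row_id_to_all_selects_py sql → Spec_add_row_id_to_all_selects_py sql (add_row_id_to_all_selects_py sql)

-- ===== LEMMAS AND PROOFS =====

-- an occurrence of pattern `pat` starting at position s of l
def OccG (pat l : List Char) (s : Nat) : Prop := pat <+: l.drop s
-- an occurrence of SELECT (case-insensitively) starting at position s of p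
def OccS (p : List Char) (s : Nat) : Prop := OccG pvSEL (PySem.Chars.upper p) s
-- an occurrence of _row_id (case-insensitively) starting at position q of p
def OccR (p : List Char) (q : Nat) : Prop := OccG pvROW (PySem.Chars.lower p) q
-- meaning of B's `sel` flag: some SELECT occurrence exists in the output so far
def SelP (p : List Char) : Prop := ∃ s, OccS p s
-- meaning of B's `row` flag: some _row_id occurrence ends strictly after every SELECT occurrence's end
def RowP (p : List Char) : Prop := ∃ q, OccR p q ∧ ∀ s, OccS p s → s + 6 < q + 7

-- alignment of A's token list: after popping trailing all-space tokens, the remainder ends in a non-space char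
def EndsOkRev (rs : List (List Char)) : Prop :=
  ∀ t r', popWsToksRev rs = t :: r' →
    ∃ ch, t.reverse.head? = some ch ∧ PySem.Chars.isspace ch = false
def EndsOk (r : List (List Char)) : Prop := EndsOkRev r.reverse

theorem join_nil_eq_flatten (r : List (List Char)) : PySem.Chars.join [] r = r.flatten := by
  simp [PySem.Chars.join, List.intercalate]
  induction r with
  | nil => rfl
  | cons t r ih =>
    cases r with
    | nil => simp
    | cons u r' => simp [List.intersperse] at *; simpa using ih

theorem slice_neg_from {α : Type} (xs : List α) (k : Nat) (hk : 0 < k) :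
    PySem.List.slice xs (some (-(k : Int))) none = xs.drop (xs.length - k) := by
  simp only [PySem.List.slice, PySem.List.clampIdx]
  split_ifs with h1 h2
  · have hle : xs.length ≤ k := by omega
    simp [Nat.sub_eq_zero_of_le hle]
  · have ha : ((xs.length : Int) + -(k:Int)).toNat = xs.length - k := by omega
    simp only [ha]
    exact List.take_of_length_le (by simp)
  · omega

theorem isspace_upperChar {c : Char} (h : PySem.Chars.isspace c = true) : PySem.Chars.upperChar c = c := by
  have hl : PySem.Chars.islower c = false := by
    simp only [PySem.Chars.isspace] at h
    simp only [PySem.Chars.islower, Bool.and_eq_false_iff, decide_eq_false_iff_not, Char.le_def,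
      UInt32.le_iff_toNat_le]
    have ha : ('a' : Char).val.toNat = 97 := by decide
    have hz : ('z' : Char).val.toNat = 122 := by decide
    have hc : c.val.toNat = c.toNat := rfl
    simp only [Bool.or_eq_true, Bool.and_eq_true, decide_eq_true_eq] at h
    rw [ha, hz, hc]
    omega
  simp [PySem.Chars.upperChar, hl]

theorem isspace_lowerChar {c : Char} (h : PySem.Chars.isspace c = true) : PySem.Chars.lowerChar c = c := by
  have hl : PySem.Chars.isupper c = false := by
    simp only [PySem.Chars.isspace] at h
    simp only [PySem.Chars.isupper, Bool.and_eq_false_iff, decide_eq_false_iff_not, Char.le_def,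
      UInt32.le_iff_toNat_le]
    have ha : ('A' : Char).val.toNat = 65 := by decide
    have hz : ('Z' : Char).val.toNat = 90 := by decide
    have hc : c.val.toNat = c.toNat := rfl
    simp only [Bool.or_eq_true, Bool.and_eq_true, decide_eq_true_eq] at h
    rw [ha, hz, hc]
    omega
  simp [PySem.Chars.lowerChar, hl]

theorem isspace_of_upperChar_M {c : Char} (h : PySem.Chars.upperChar c = 'M') :
    PySem.Chars.isspace c = false := by
  by_contra hc
  have hc' : PySem.Chars.isspace c = true := by revert hc; cases PySem.Chars.isspace c <;> simp
  have h2 := isspace_upperChar hc'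
  rw [h] at h2
  rw [← h2] at hc'
  exact absurd hc' (by decide)

-- generic occurrence facts
theorem occG_bound {pat l : List Char} {s : Nat} (hpat : pat ≠ []) (h : OccG pat l s) :
    s + pat.length ≤ l.length := by
  unfold OccG at h
  have h1 := h.length_le
  simp only [List.length_drop] at h1
  have h2 : l.drop s ≠ [] := by
    intro hn
    rw [hn] at h
    exact hpat (List.prefix_nil.mp h)
  have h3 : s < l.length := by
    by_contra hx
    exact h2 (List.drop_eq_nil_of_le (by omega))
  omega

theorem occG_append {pat l t : List Char} {s : Nat} (hpat : pat ≠ []) (h : OccG pat l s) :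
    OccG pat (l ++ t) s := by
  have hb := occG_bound hpat h
  unfold OccG at *
  rw [List.drop_append_of_le_length (by omega)]
  exact h.trans (List.prefix_append _ _)

theorem occG_restrict {pat l t : List Char} {s : Nat} (hle : s + pat.length ≤ l.length) :
    OccG pat (l ++ t) s ↔ OccG pat l s := by
  unfold OccG
  rw [List.drop_append_of_le_length (by omega)]
  constructor
  · intro h
    rw [List.prefix_iff_eq_take] at h ⊢
    rwa [List.take_append_of_le_length (by simp; omega)] at h
  · intro h
    exact h.trans (List.prefix_append _ _)

theorem occG_getElem? {pat l : List Char} {s i : Nat} (h : OccG pat l s) (hi : i < pat.length) :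
    l[s + i]? = some pat[i] := by
  unfold OccG at h
  have h1 : pat[i] = (l.drop s)[i]'(lt_of_lt_of_le hi h.length_le) := h.getElem hi
  rw [List.getElem_drop] at h1
  rw [List.getElem?_eq_getElem (by have := h.length_le; simp at this; omega)]
  rw [h1]

-- occurrences are unaffected by an all-space tail
theorem occG_map_space_tail {f : Char → Char} (hf : ∀ c, PySem.Chars.isspace c = true → f c = c)
    {pat : List Char} {chl : Char} (hlast : pat.getLast? = some chl)
    (hchl : PySem.Chars.isspace chl = false)
    {p ws : List Char} (hws : ∀ w ∈ ws, PySem.Chars.isspace w = true) (s : Nat) :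
    OccG pat ((p ++ ws).map f) s ↔ OccG pat (p.map f) s := by
  have hpat : pat ≠ [] := by intro hn; rw [hn] at hlast; simp at hlast
  rw [List.map_append]
  by_cases hle : s + pat.length ≤ (p.map f).length
  · exact occG_restrict hle
  · constructor
    · intro h
      exfalso
      have hb := occG_bound hpat h
      simp only [List.length_append, List.length_map] at hb hle
      have hLpos : 0 < pat.length := List.length_pos_iff.mpr hpat
      have h1 := occG_getElem? h (i := pat.length - 1) (by omega)
      have h2 : pat[pat.length - 1] = chl := by
        have := List.getLast?_eq_getElem? (l := pat)
        rw [hlast] at this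
        have h3 : pat[pat.length - 1]? = some chl := this.symm
        rwa [List.getElem?_eq_getElem (by omega), Option.some_inj] at h3
      rw [h2] at h1
      rw [List.getElem?_append_right (by simp; omega)] at h1
      simp only [List.length_map] at h1
      rw [List.getElem?_map] at h1
      set j := s + (pat.length - 1) - p.length with hj
      have hjlt : j < ws.length := by omega
      rw [List.getElem?_eq_getElem hjlt] at h1
      simp only [Option.map_some, Option.some_inj] at h1
      have hw : ws[j] ∈ ws := List.getElem_mem hjlt
      have hsp := hws _ hw
      rw [hf _ hsp] at h1
      rw [h1] at hsp
      rw [hsp] at hchl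
      exact absurd hchl (by simp)
    · intro h
      exact occG_append hpat h

theorem upper_eq_map (p : List Char) : PySem.Chars.upper p = p.map PySem.Chars.upperChar := rfl
theorem lower_eq_map (p : List Char) : PySem.Chars.lower p = p.map PySem.Chars.lowerChar := rfl

theorem occS_space_tail {p ws : List Char} (hws : ∀ w ∈ ws, PySem.Chars.isspace w = true)
    (s : Nat) : OccS (p ++ ws) s ↔ OccS p s := by
  unfold OccS
  rw [upper_eq_map, upper_eq_map]
  exact occG_map_space_tail (fun c h => isspace_upperChar h) (chl := 'T') (by decide) (by decide) hws s

theorem occR_space_tail {p ws : List Char} (hws : ∀ w ∈ ws, PySem.Chars.isspace w = true)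
    (q : Nat) : OccR (p ++ ws) q ↔ OccR p q := by
  unfold OccR
  rw [lower_eq_map, lower_eq_map]
  exact occG_map_space_tail (fun c h => isspace_lowerChar h) (chl := 'd') (by decide) (by decide) hws q

theorem selP_space_tail {p ws : List Char} (hws : ∀ w ∈ ws, PySem.Chars.isspace w = true) :
    SelP (p ++ ws) ↔ SelP p := by
  unfold SelP
  exact exists_congr fun s => occS_space_tail hws s

theorem rowP_space_tail {p ws : List Char} (hws : ∀ w ∈ ws, PySem.Chars.isspace w = true) :
    RowP (p ++ ws) ↔ RowP p := by
  unfold RowP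
  refine exists_congr fun q => ?_
  rw [occR_space_tail hws]
  constructor
  · rintro ⟨h1, h2⟩
    exact ⟨h1, fun s hs => h2 s ((occS_space_tail hws s).mpr hs)⟩
  · rintro ⟨h1, h2⟩
    exact ⟨h1, fun s hs => h2 s ((occS_space_tail hws s).mp hs)⟩

-- the constant-size suffix check of feedB, characterised as an occurrence at the very end
theorem checkG_iff {f : Char → Char} {pat : List Char} {k : Nat} (hk : pat.length = k)
    (hk0 : 0 < k) (p' : List Char) :
    ((PySem.List.slice p' (some (-(k : Int))) none).map f = pat) ↔
      (k ≤ p'.length ∧ OccG pat (p'.map f) (p'.length - k)) := by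
  rw [slice_neg_from _ _ hk0]
  by_cases hle : k ≤ p'.length
  · simp only [hle, true_and]
    unfold OccG
    rw [← List.map_drop]
    have hlen : ((p'.drop (p'.length - k)).map f).length = k := by simp; omega
    constructor
    · intro h; rw [h]
    · intro h
      exact ((h.eq_of_length (by rw [hlen, hk])).symm)
  · constructor
    · intro h
      exfalso
      have : ((p'.drop (p'.length - k)).map f).length = pat.length := by rw [h]
      simp at this
      omega
    · intro h; exact absurd h.1 hle

theorem checkS_iff (p' : List Char) :
    (PySem.Chars.upper (PySem.List.slice p' (some (-6 : Int)) none) = pvSEL) ↔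
      (6 ≤ p'.length ∧ OccS p' (p'.length - 6)) := by
  have h := checkG_iff (f := PySem.Chars.upperChar) (pat := pvSEL) (k := 6) rfl (by norm_num) p'
  rw [upper_eq_map]
  exact h

theorem checkR_iff (p' : List Char) :
    (PySem.Chars.lower (PySem.List.slice p' (some (-7 : Int)) none) = pvROW) ↔
      (7 ≤ p'.length ∧ OccR p' (p'.length - 7)) := by
  have h := checkG_iff (f := PySem.Chars.lowerChar) (pat := pvROW) (k := 7) rfl (by norm_num) p'
  rw [lower_eq_map]
  exact h

theorem occS_char_iff {p : List Char} {c : Char}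
    (hns : ¬ (6 ≤ p.length + 1 ∧ OccS (p ++ [c]) (p.length + 1 - 6))) (s : Nat) :
    OccS (p ++ [c]) s ↔ OccS p s := by
  constructor
  · intro h
    have hb := occG_bound (pat := pvSEL) (by decide) h
    simp only [upper_eq_map, List.length_map, List.length_append, List.length_cons,
      List.length_nil] at hb
    have hb' : s + 6 ≤ p.length + 1 := hb
    by_cases hle : s + 6 ≤ p.length
    · unfold OccS at h ⊢
      rw [upper_eq_map, List.map_append] at h
      rw [upper_eq_map]
      exact (occG_restrict (by simpa using hle)).mp h
    · exfalso
      have hseq : s = p.length + 1 - 6 := by omega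
      exact hns ⟨by omega, hseq ▸ h⟩
  · intro h
    unfold OccS at h ⊢
    rw [upper_eq_map] at h
    rw [upper_eq_map, List.map_append]
    exact occG_append (by decide) h

theorem occR_char_iff {p : List Char} {c : Char}
    (hns : ¬ (7 ≤ p.length + 1 ∧ OccR (p ++ [c]) (p.length + 1 - 7))) (q : Nat) :
    OccR (p ++ [c]) q ↔ OccR p q := by
  constructor
  · intro h
    have hb := occG_bound (pat := pvROW) (by decide) h
    simp only [lower_eq_map, List.length_map, List.length_append, List.length_cons,
      List.length_nil] at hb
    have hb' : q + 7 ≤ p.length + 1 := hb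
    by_cases hle : q + 7 ≤ p.length
    · unfold OccR at h ⊢
      rw [lower_eq_map, List.map_append] at h
      rw [lower_eq_map]
      exact (occG_restrict (by simpa using hle)).mp h
    · exfalso
      have hqeq : q = p.length + 1 - 7 := by omega
      exact hns ⟨by omega, hqeq ▸ h⟩
  · intro h
    unfold OccR at h ⊢
    rw [lower_eq_map] at h
    rw [lower_eq_map, List.map_append]
    exact occG_append (by decide) h

theorem selP_char_iff {p : List Char} {c : Char}
    (hns : ¬ (6 ≤ p.length + 1 ∧ OccS (p ++ [c]) (p.length + 1 - 6))) :
    SelP (p ++ [c]) ↔ SelP p :=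
  exists_congr fun s => occS_char_iff hns s

theorem rowP_char_iff {p : List Char} {c : Char}
    (hnsS : ¬ (6 ≤ p.length + 1 ∧ OccS (p ++ [c]) (p.length + 1 - 6)))
    (hnsR : ¬ (7 ≤ p.length + 1 ∧ OccR (p ++ [c]) (p.length + 1 - 7))) :
    RowP (p ++ [c]) ↔ RowP p := by
  unfold RowP
  refine exists_congr fun q => ?_
  rw [occR_char_iff hnsR]
  constructor
  · rintro ⟨h1, h2⟩
    exact ⟨h1, fun s hs => h2 s ((occS_char_iff hnsS s).mpr hs)⟩
  · rintro ⟨h1, h2⟩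
    exact ⟨h1, fun s hs => h2 s ((occS_char_iff hnsS s).mp hs)⟩

theorem feedB_spec {p : List Char} {sel row : Bool} (c : Char)
    (hs : sel = true ↔ SelP p) (hr : row = true ↔ RowP p) :
    (feedB (p, sel, row) c).1 = p ++ [c] ∧
      ((feedB (p, sel, row) c).2.1 = true ↔ SelP (p ++ [c])) ∧
      ((feedB (p, sel, row) c).2.2 = true ↔ RowP (p ++ [c])) := by
  have hlen : (p ++ [c]).length = p.length + 1 := by simp
  by_cases h6 : PySem.Chars.upper (PySem.List.slice (p ++ [c]) (some (-6 : Int)) none) = pvSEL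
  · have hfeed : feedB (p, sel, row) c = (p ++ [c], true, false) := by
      simp only [feedB]
      rw [if_pos h6]
    rw [checkS_iff, hlen] at h6
    refine hfeed ▸ ⟨rfl, ⟨fun _ => ⟨_, h6.2⟩, fun _ => rfl⟩, ?_⟩
    constructor
    · intro h; exact absurd h (by simp)
    · rintro ⟨q, hq, hall⟩
      have h1 := hall _ h6.2
      have h2 := occG_bound (pat := pvROW) (by decide) hq
      simp only [lower_eq_map, List.length_map, hlen,
        show pvROW.length = 7 from rfl] at h2
      omega
  · by_cases h7 : PySem.Chars.lower (PySem.List.slice (p ++ [c]) (some (-7 : Int)) none) = pvROW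
    · have hfeed : feedB (p, sel, row) c = (p ++ [c], sel, true) := by
        simp only [feedB]
        rw [if_neg h6, if_pos h7]
      rw [checkS_iff, hlen] at h6
      rw [checkR_iff, hlen] at h7
      refine hfeed ▸ ⟨rfl, ?_, ?_⟩
      · rw [hs]; exact (selP_char_iff h6).symm
      · refine ⟨fun _ => ⟨p.length + 1 - 7, h7.2, fun s hsOcc => ?_⟩, fun _ => rfl⟩
        have hb := occG_bound (pat := pvSEL) (by decide) hsOcc
        simp only [upper_eq_map, List.length_map, hlen,
          show pvSEL.length = 6 from rfl] at hb
        have hne : ¬ (s + 6 = p.length + 1) := by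
          intro heq
          exact h6 ⟨by omega, by rwa [show p.length + 1 - 6 = s by omega]⟩
        omega
    · have hfeed : feedB (p, sel, row) c = (p ++ [c], sel, row) := by
        simp only [feedB]
        rw [if_neg h6, if_neg h7]
      rw [checkS_iff, hlen] at h6
      rw [checkR_iff, hlen] at h7
      refine hfeed ▸ ⟨rfl, ?_, ?_⟩
      · rw [hs]; exact (selP_char_iff h6).symm
      · rw [hr]; exact (rowP_char_iff h6 h7).symm

theorem foldl_feedB_spec (t : List Char) :
    ∀ (p : List Char) (sel row : Bool),
      (sel = true ↔ SelP p) → (row = true ↔ RowP p) →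
      (t.foldl feedB (p, sel, row)).1 = p ++ t ∧
        ((t.foldl feedB (p, sel, row)).2.1 = true ↔ SelP (p ++ t)) ∧
        ((t.foldl feedB (p, sel, row)).2.2 = true ↔ RowP (p ++ t)) := by
  induction t with
  | nil => intro p sel row hs hr; simpa using ⟨hs, hr⟩
  | cons c t ih =>
    intro p sel row hs hr
    have h1 := feedB_spec c hs hr
    simp only [List.foldl_cons]
    have hst : feedB (p, sel, row) c =
        ((feedB (p, sel, row) c).1, (feedB (p, sel, row) c).2.1, (feedB (p, sel, row) c).2.2) := rfl
    rw [hst, h1.1]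
    have h2 := ih (p ++ [c]) _ _ h1.2.1 h1.2.2
    simpa using h2

theorem foldl_feedB_spec' (t : List Char) (st : List Char × Bool × Bool)
    (hs : st.2.1 = true ↔ SelP st.1) (hr : st.2.2 = true ↔ RowP st.1) :
    (t.foldl feedB st).1 = st.1 ++ t ∧
      ((t.foldl feedB st).2.1 = true ↔ SelP (st.1 ++ t)) ∧
      ((t.foldl feedB st).2.2 = true ↔ RowP (st.1 ++ t)) := by
  obtain ⟨p, sel, row⟩ := st
  exact foldl_feedB_spec t p sel row hs hr

theorem strIsspace_iff (t : List Char) :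
    PySem.Chars.strIsspace t = true ↔ t ≠ [] ∧ ∀ w ∈ t, PySem.Chars.isspace w = true := by
  simp [PySem.Chars.strIsspace]

theorem popChars_append_space {p ws : List Char} (hws : ∀ w ∈ ws, PySem.Chars.isspace w = true) :
    popChars (p ++ ws) = popChars p := by
  unfold popChars
  rw [List.reverse_append, List.dropWhile_append]
  have : ws.reverse.dropWhile PySem.Chars.isspace = [] := by
    rw [List.dropWhile_eq_nil_iff]
    intro x hx
    exact hws x (List.mem_reverse.mp hx)
  simp [this]

theorem popChars_eq_self {p : List Char} {ch : Char} (hh : p.reverse.head? = some ch)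
    (hch : PySem.Chars.isspace ch = false) : popChars p = p := by
  unfold popChars
  cases hrev : p.reverse with
  | nil => rw [hrev] at hh; simp at hh
  | cons x xs =>
    rw [hrev] at hh
    simp only [List.head?_cons, Option.some_inj] at hh
    rw [List.dropWhile_cons]
    rw [hh, hch]
    simp only [Bool.false_eq_true, if_false, List.reverse_cons]
    rw [← hh]
    have h2 := congrArg List.reverse hrev
    simpa using h2.symm

theorem popChars_spec (p : List Char) :
    ∃ ws, p = popChars p ++ ws ∧ ∀ w ∈ ws, PySem.Chars.isspace w = true := by
  refine ⟨(p.reverse.takeWhile PySem.Chars.isspace).reverse, ?_, ?_⟩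
  · unfold popChars
    rw [← List.reverse_append, List.takeWhile_append_dropWhile, p.reverse_reverse]
  · intro w hw
    exact List.mem_takeWhile_imp (List.mem_reverse.mp hw)

theorem popWsToksRev_cons (t : List Char) (rs : List (List Char)) :
    popWsToksRev (t :: rs) = if PySem.Chars.strIsspace t then popWsToksRev rs else t :: rs := rfl

theorem endsOk_nil : EndsOk [] := by
  intro t r' h
  simp [popWsToksRev] at h

theorem endsOk_append_space {r : List (List Char)} {t : List Char} (h : EndsOk r)
    (hsp : PySem.Chars.strIsspace t = true) : EndsOk (r ++ [t]) := by
  unfold EndsOk EndsOkRev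
  rw [List.reverse_append]
  simp only [List.reverse_cons, List.reverse_nil, List.nil_append, List.singleton_append]
  rw [popWsToksRev_cons, if_pos hsp]
  exact h

theorem endsOk_append_nonspace {r : List (List Char)} {t : List Char} {ch : Char}
    (hh : t.reverse.head? = some ch) (hch : PySem.Chars.isspace ch = false) :
    EndsOk (r ++ [t]) := by
  unfold EndsOk EndsOkRev
  rw [List.reverse_append]
  simp only [List.reverse_cons, List.reverse_nil, List.nil_append, List.singleton_append]
  have hsp : PySem.Chars.strIsspace t = false := by
    rw [← Bool.not_eq_true, strIsspace_iff]
    rintro ⟨hne, hall⟩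
    cases hrev : t.reverse with
    | nil => rw [hrev] at hh; simp at hh
    | cons x xs =>
      rw [hrev] at hh
      simp only [List.head?_cons, Option.some_inj] at hh
      have hx : x ∈ t := by
        rw [← List.mem_reverse, hrev]; simp
      have := hall x hx
      rw [hh] at this
      rw [this] at hch
      simp at hch
  rw [popWsToksRev_cons, if_neg (by simp [hsp])]
  intro u r' hu
  rw [List.cons.injEq] at hu
  exact ⟨ch, hu.1 ▸ hh, hch⟩

theorem endsOk_flatten_pop {r : List (List Char)} (h : EndsOk r) :
    (popWsToks r).flatten = popChars r.flatten := by
  unfold EndsOk at h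
  unfold popWsToks
  have key : ∀ rs : List (List Char), EndsOkRev rs →
      (popWsToksRev rs).reverse.flatten = popChars rs.reverse.flatten := by
    intro rs
    induction rs with
    | nil => intro _; rfl
    | cons t rs ih =>
      intro hok
      by_cases hsp : PySem.Chars.strIsspace t = true
      · rw [popWsToksRev_cons, if_pos hsp]
        have hws := (strIsspace_iff t).mp hsp
        rw [ih (by rwa [EndsOkRev, popWsToksRev_cons, if_pos hsp] at hok)]
        simp only [List.reverse_cons, List.flatten_append, List.flatten_cons, List.flatten_nil,
          List.append_nil]
        rw [popChars_append_space hws.2]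
      · rw [popWsToksRev_cons, if_neg hsp]
        have hok' := hok t rs
        rw [popWsToksRev_cons, if_neg hsp] at hok'
        obtain ⟨ch, hh, hch⟩ := hok' rfl
        simp only [List.reverse_cons, List.flatten_append, List.flatten_cons, List.flatten_nil,
          List.append_nil]
        rw [popChars_eq_self (p := rs.reverse.flatten ++ t) (ch := ch) ?_ hch]
        rw [List.reverse_append]
        cases hrev : t.reverse with
        | nil => rw [hrev] at hh; simp at hh
        | cons x xs => rw [hrev] at hh; simpa using hh
  simpa using key r.reverse h

theorem rfind_go_zero (s sub : List Char) :
    PySem.Chars.rfind.go s sub 0 = if sub.isPrefixOf s then 0 else -1 := rfl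

theorem rfind_go_succ (s sub : List Char) (j : Nat) :
    PySem.Chars.rfind.go s sub (j + 1) =
      if sub.isPrefixOf (s.drop (j + 1)) then ((j : Int) + 1) else PySem.Chars.rfind.go s sub j := rfl

theorem rfind_go_spec (s sub : List Char) (j : Nat) :
    (PySem.Chars.rfind.go s sub j = -1 ∧ ∀ k ≤ j, ¬ sub <+: s.drop k) ∨
      (∃ k : Nat, PySem.Chars.rfind.go s sub j = (k : Int) ∧ k ≤ j ∧ sub <+: s.drop k ∧
        ∀ m, k < m → m ≤ j → ¬ sub <+: s.drop m) := by
  induction j with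
  | zero =>
    rw [rfind_go_zero]
    by_cases h : sub.isPrefixOf s = true
    · right
      exact ⟨0, by rw [if_pos h]; rfl, le_refl _, by simpa [List.isPrefixOf_iff_prefix] using h,
        by omega⟩
    · left
      refine ⟨by rw [if_neg h], fun k hk => ?_⟩
      interval_cases k
      simpa [List.isPrefixOf_iff_prefix] using h
  | succ j ih =>
    rw [rfind_go_succ]
    by_cases h : sub.isPrefixOf (s.drop (j + 1)) = true
    · right
      refine ⟨j + 1, by rw [if_pos h]; push_cast; ring, le_refl _,
        by simpa [List.isPrefixOf_iff_prefix] using h, fun m hm1 hm2 => by omega⟩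
    · rw [if_neg h]
      rcases ih with ⟨h1, h2⟩ | ⟨k, h1, h2, h3, h4⟩
      · left
        refine ⟨h1, fun k hk => ?_⟩
        by_cases hkj : k ≤ j
        · exact h2 k hkj
        · have : k = j + 1 := by omega
          subst this
          simpa [List.isPrefixOf_iff_prefix] using h
      · right
        refine ⟨k, h1, by omega, h3, fun m hm1 hm2 => ?_⟩
        by_cases hmj : m ≤ j
        · exact h4 m hm1 hmj
        · have : m = j + 1 := by omega
          subst this
          simpa [List.isPrefixOf_iff_prefix] using h

-- A's re-scan decision (rfind the last SELECT, then search the clause for _row_id)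
-- equals B's flag condition
theorem decisionA (p : List Char) :
    (PySem.Chars.rfind (PySem.Chars.upper p) pvSEL ≠ -1 ∧
      ¬ PySem.Chars.isIn pvROW (PySem.Chars.lower
        (PySem.List.slice p (some (PySem.Chars.rfind (PySem.Chars.upper p) pvSEL)) none)) = true)
      ↔ (SelP p ∧ ¬ RowP p) := by
  have hspec := rfind_go_spec (PySem.Chars.upper p) pvSEL (PySem.Chars.upper p).length
  have hglobal : ∀ k, (PySem.Chars.upper p).length < k → ¬ pvSEL <+: (PySem.Chars.upper p).drop k := by
    intro k hk hpre
    rw [List.drop_eq_nil_of_le (by omega)] at hpre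
    have := List.prefix_nil.mp hpre
    simp [pvSEL] at this
  rcases hspec with ⟨h1, h2⟩ | ⟨k, h1, hk2, h3, h4⟩
  · -- rfind = -1 : no SELECT at all
    have hnosel : ¬ SelP p := by
      rintro ⟨s, hs⟩
      by_cases hsle : s ≤ (PySem.Chars.upper p).length
      · exact h2 s hsle hs
      · exact hglobal s (by omega) hs
    constructor
    · rintro ⟨ha, _⟩
      exact absurd (show PySem.Chars.rfind (PySem.Chars.upper p) pvSEL = -1 from h1) ha
    · rintro ⟨hsel, _⟩
      exact absurd hsel hnosel
  · -- rfind = k : k is the last SELECT occurrence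
    have hmax : ∀ m, k < m → ¬ pvSEL <+: (PySem.Chars.upper p).drop m := by
      intro m hm
      by_cases hmle : m ≤ (PySem.Chars.upper p).length
      · exact h4 m hm hmle
      · exact hglobal m (by omega)
    have hrfind : PySem.Chars.rfind (PySem.Chars.upper p) pvSEL = (k : Int) := h1
    have hslice : PySem.List.slice p (some ((k : Nat) : Int)) none = p.drop k :=
      PySem.List.slice_from p (by positivity)
    rw [hrfind, hslice]
    have hisin : PySem.Chars.isIn pvROW (PySem.Chars.lower (p.drop k)) = true ↔
        ∃ q, k ≤ q ∧ OccR p q := by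
      rw [← PySem.Chars.exists_prefix_drop_iff_isIn]
      constructor
      · rintro ⟨j, hj⟩
        refine ⟨k + j, by omega, ?_⟩
        unfold OccR OccG
        rw [lower_eq_map] at hj ⊢
        rw [List.map_drop, List.drop_drop] at hj
        exact hj
      · rintro ⟨q, hq1, hq2⟩
        refine ⟨q - k, ?_⟩
        unfold OccR OccG at hq2
        rw [lower_eq_map] at hq2 ⊢
        rw [List.map_drop, List.drop_drop]
        rwa [show k + (q - k) = q by omega]
    constructor
    · rintro ⟨_, hno⟩
      refine ⟨⟨k, h3⟩, ?_⟩
      rintro ⟨q, hq, hall⟩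
      have hk6 := hall k h3
      exact hno (hisin.mpr ⟨q, by omega, hq⟩)
    · rintro ⟨_, hnorow⟩
      refine ⟨by simp, ?_⟩
      rw [hisin]
      rintro ⟨q, hq1, hq2⟩
      refine hnorow ⟨q, hq2, fun s hs => ?_⟩
      have hsk : s ≤ k := by
        by_contra hgt
        exact hmax s (by omega) hs
      omega

theorem fromTok_eq (sql : List Char) (i : Nat) :
    PySem.List.slice sql (some (i : Int)) (some ((i : Int) + 4)) = (sql.drop i).take 4 := by
  have h : ((i : Int) + 4) = ((i + 4 : Nat) : Int) := by push_cast; ring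
  rw [h, PySem.List.slice_natCast]
  congr 1
  omega

theorem fromCond_iff (sql : List Char) (i : Nat) :
    (PySem.Chars.startswith (PySem.Chars.upper (PySem.List.slice sql (some (i : Int)) none)) pvFROM
        = true) ↔
      (PySem.Chars.upper (PySem.List.slice sql (some (i : Int)) (some ((i : Int) + 4))) = pvFROM) := by
  rw [fromTok_eq, PySem.List.slice_from sql (by positivity)]
  have hcast : ((i : Int)).toNat = i := by omega
  rw [hcast]
  set X := sql.drop i
  rw [PySem.Chars.startswith, List.isPrefixOf_iff_prefix]
  rw [upper_eq_map, upper_eq_map, List.map_take]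
  rw [List.prefix_iff_eq_take]
  have hlen : pvFROM.length = 4 := rfl
  rw [hlen]
  exact eq_comm

theorem fromTok_last {X : List Char} (h : PySem.Chars.upper X = pvFROM) :
    ∃ ch, X.reverse.head? = some ch ∧ PySem.Chars.isspace ch = false := by
  rw [upper_eq_map] at h
  have hlen : X.length = 4 := by
    have := congrArg List.length h
    simpa using this
  have h3 : X.length - 1 = 3 := by omega
  have hM : PySem.Chars.upperChar (X[3]'(by omega)) = 'M' := by
    have := congrArg (fun l => l[3]?) h
    simp only [List.getElem?_map] at this
    rw [List.getElem?_eq_getElem (by omega)] at this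
    simpa [pvFROM] using this
  refine ⟨X[3]'(by omega), ?_, isspace_of_upperChar_M hM⟩
  rw [List.head?_reverse, List.getLast?_eq_getElem?, h3, List.getElem?_eq_getElem (by omega)]

theorem quote_facts (sql : List Char) (c : Char) (i : Nat) (hi : i < sql.length)
    (he : PySem.Chars.findFrom sql [c] ((i : Int) + 1) ≠ -1) :
    i + 1 ≤ (PySem.Chars.findFrom sql [c] ((i : Int) + 1)).toNat ∧
      (PySem.Chars.findFrom sql [c] ((i : Int) + 1)).toNat < sql.length ∧
      PySem.List.slice sql (some (i : Int)) (some (PySem.Chars.findFrom sql [c] ((i : Int) + 1) + 1))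
        = (sql.drop i).take ((PySem.Chars.findFrom sql [c] ((i : Int) + 1)).toNat + 1 - i) ∧
      (PySem.List.slice sql (some (i : Int))
          (some (PySem.Chars.findFrom sql [c] ((i : Int) + 1) + 1))).reverse.head? = some c := by
  have hcast : ((i : Int) + 1) = ((i + 1 : Nat) : Int) := by push_cast; ring
  rw [hcast] at he ⊢
  have hspec := PySem.Chars.findFrom_natCast_spec sql [c] (i + 1) (by omega) he
  set e := PySem.Chars.findFrom sql [c] ((i + 1 : Nat) : Int) with hedef
  have he1 : i + 1 ≤ e.toNat := by omega
  have hpre := hspec.2.1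
  have hne : sql.drop e.toNat ≠ [] := by
    intro hn
    rw [hn] at hpre
    simpa using List.prefix_nil.mp hpre
  have he2 : e.toNat < sql.length := by
    by_contra hx
    exact hne (List.drop_eq_nil_of_le (by omega))
  have hgetc : sql[e.toNat]'he2 = c := by
    have h0 := hpre.getElem (i := 0) (by simp)
    simpa [List.getElem_drop] using h0.symm
  have hslice : PySem.List.slice sql (some (i : Int)) (some (e + 1))
      = (sql.drop i).take (e.toNat + 1 - i) := by
    have hc2 : e + 1 = ((e.toNat + 1 : Nat) : Int) := by omega
    rw [hc2, PySem.List.slice_natCast]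
  refine ⟨he1, he2, hslice, ?_⟩
  rw [hslice]
  set X := (sql.drop i).take (e.toNat + 1 - i) with hX
  have hXlen : X.length = e.toNat + 1 - i := by
    simp [hX]
    omega
  have hXlast : X[X.length - 1]? = some c := by
    rw [hXlen]
    have hidx : e.toNat + 1 - i - 1 = e.toNat - i := by omega
    rw [hidx]
    rw [hX]
    rw [List.getElem?_take_of_lt (by omega)]
    rw [List.getElem?_drop]
    rw [show i + (e.toNat - i) = e.toNat by omega]
    rw [List.getElem?_eq_getElem he2, hgetc]
  rw [List.head?_reverse, List.getLast?_eq_getElem?]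
  exact hXlast

theorem strIsspace_singleton (c : Char) :
    PySem.Chars.strIsspace [c] = PySem.Chars.isspace c := by
  simp [PySem.Chars.strIsspace]

set_option maxHeartbeats 1200000 in
set_option maxRecDepth 4096 in
theorem loop_eq (sql : List Char) :
    ∀ (d i : Nat) (result : List (List Char)) (st : List Char × Bool × Bool),
      sql.length - i ≤ d →
      st.1 = result.flatten →
      (st.2.1 = true ↔ SelP st.1) →
      (st.2.2 = true ↔ RowP st.1) →
      EndsOk result →
      loopB sql d i st = (loopA sql d i result).flatten := by
  intro d
  induction d with
  | zero =>
    intro i result st hd h1 hs hr he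
    exact h1
  | succ d ih =>
    intro i result st hd h1 hs hr he
    obtain ⟨p, sel, row⟩ := st
    simp only at h1 hs hr
    by_cases hi : i < sql.length
    swap
    · simp only [loopA, loopB]
      simp [hi, h1]
    simp only [loopA, loopB]
    simp only [dif_pos hi]
    have hsingle : loopB sql d (i + 1) (feedB (p, sel, row) (sql[i]'hi)) =
        (loopA sql d (i + 1) (result ++ [[sql[i]'hi]])).flatten := by
      have hfeed := feedB_spec (p := p) (sql[i]'hi) hs hr
      have hE : EndsOk (result ++ [[sql[i]'hi]]) := by
        by_cases hsp : PySem.Chars.isspace (sql[i]'hi) = true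
        · exact endsOk_append_space he (by rw [strIsspace_singleton]; exact hsp)
        · exact endsOk_append_nonspace (t := [sql[i]'hi]) (ch := sql[i]'hi) (by simp)
            (by simpa using hsp)
      refine ih (i + 1) (result ++ [[sql[i]'hi]]) _ (by omega) ?_ ?_ ?_ hE
      · rw [hfeed.1, h1]; simp
      · rw [hfeed.1]; exact hfeed.2.1
      · rw [hfeed.1]; exact hfeed.2.2
    by_cases hq : sql[i] = '"' ∨ sql[i] = '\''
    · have hquote : ∀ c : Char, sql[i] = c → PySem.Chars.isspace c = false →
          (if PySem.Chars.findFrom sql [c] ((i : Int) + 1) = -1 then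
              (List.foldl feedB (p, sel, row) (PySem.List.slice sql (some (i : Int)))).1
            else
              loopB sql d ((PySem.Chars.findFrom sql [c] ((i : Int) + 1)).toNat + 1)
                (List.foldl feedB (p, sel, row)
                  (PySem.List.slice sql (some (i : Int))
                    (some (PySem.Chars.findFrom sql [c] ((i : Int) + 1) + 1))))) =
          (if PySem.Chars.findFrom sql [c] ((i : Int) + 1) = -1 then
              result ++ [PySem.List.slice sql (some (i : Int))]
            else
              loopA sql d ((PySem.Chars.findFrom sql [c] ((i : Int) + 1)).toNat + 1)
                (result ++ [PySem.List.slice sql (some (i : Int))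
                  (some (PySem.Chars.findFrom sql [c] ((i : Int) + 1) + 1))])).flatten := by
        intro c hceq hcns
        by_cases he : PySem.Chars.findFrom sql [c] ((i : Int) + 1) = -1
        · rw [if_pos he, if_pos he]
          have hfold := foldl_feedB_spec (PySem.List.slice sql (some (i : Int)) none) p sel row hs hr
          rw [hfold.1, h1]
          simp
        · rw [if_neg he, if_neg he]
          obtain ⟨hq1, hq2, hq3, hq4⟩ := quote_facts sql c i hi he
          set X := PySem.List.slice sql (some (i : Int))
            (some (PySem.Chars.findFrom sql [c] ((i : Int) + 1) + 1)) with hXdef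
          have hfold := foldl_feedB_spec X p sel row hs hr
          have hE : EndsOk (result ++ [X]) := endsOk_append_nonspace hq4 hcns
          refine ih _ (result ++ [X]) _ (by omega) ?_ ?_ ?_ hE
          · rw [hfold.1, h1]; simp
          · rw [hfold.1]; exact hfold.2.1
          · rw [hfold.1]; exact hfold.2.2
      rcases hq with hc | hc
      · rw [hc]
        rw [if_pos (show ('"' : Char) = '"' ∨ ('"' : Char) = '\'' from Or.inl rfl)]
        rw [if_pos (rfl : ('"' : Char) = '"')]
        exact hquote '"' hc (by decide)
      · rw [hc]
        rw [if_neg (by decide : ¬ (('\'' : Char) = '"'))]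
        rw [if_pos (show ('\'' : Char) = '"' ∨ ('\'' : Char) = '\'' from Or.inr rfl)]
        rw [if_pos (rfl : ('\'' : Char) = '\'')]
        exact hquote '\'' hc (by decide)
    · rw [not_or] at hq
      rw [if_neg hq.1, if_neg hq.2, if_neg (not_or.mpr hq)]
      have hor_iff : (i = 0 ∨ (¬ PySem.Chars.isalnum (sql.getD (i - 1) ' ') = true ∧
            sql.getD (i - 1) ' ' ≠ '_')) ↔
          (i = 0 ∨ ¬ (PySem.Chars.isalnum (sql.getD (i - 1) ' ') = true ∨
            sql.getD (i - 1) ' ' = '_')) := or_congr Iff.rfl not_or.symm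
      have hcond_iff := and_congr (fromCond_iff sql i) hor_iff
      by_cases hf : PySem.Chars.upper (PySem.List.slice sql (some (i : Int)) (some ((i : Int) + 4))) = pvFROM
          ∧ (i = 0 ∨ ¬ (PySem.Chars.isalnum (sql.getD (i - 1) ' ') = true ∨ sql.getD (i - 1) ' ' = '_'))
      · rw [if_pos hf, if_pos (hcond_iff.mpr hf)]
        have hb_iff : (sql.length ≤ i + 4 ∨ (¬ PySem.Chars.isalnum (sql.getD (i + 4) ' ') = true ∧
              sql.getD (i + 4) ' ' ≠ '_')) ↔
            (sql.length ≤ i + 4 ∨ ¬ (PySem.Chars.isalnum (sql.getD (i + 4) ' ') = true ∨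
              sql.getD (i + 4) ' ' = '_')) := or_congr Iff.rfl not_or.symm
        by_cases hb : sql.length ≤ i + 4 ∨ ¬ (PySem.Chars.isalnum (sql.getD (i + 4) ' ') = true ∨
            sql.getD (i + 4) ' ' = '_')
        · rw [if_pos hb, if_pos (hb_iff.mpr hb)]
          have hpre : PySem.Chars.join [] result = p := by rw [join_nil_eq_flatten, h1]
          rw [hpre]
          set X4 := PySem.List.slice sql (some (i : Int)) (some ((i : Int) + 4)) with hX4def
          obtain ⟨ch4, hch4, hch4n⟩ := fromTok_last hf.1
          by_cases hins : sel = true ∧ ¬ row = true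
          · have hinsP : SelP p ∧ ¬ RowP p := ⟨hs.mp hins.1, fun hrp => hins.2 (hr.mpr hrp)⟩
            have hA := (decisionA p).mpr hinsP
            rw [if_pos hins, if_pos hA.1, if_pos hA.2]
            obtain ⟨ws, hpw, hws⟩ := popChars_spec p
            have hsel' : sel = true ↔ SelP (popChars p) := by
              rw [hs]
              conv_lhs => rw [hpw]
              exact selP_space_tail hws
            have hrow' : row = true ↔ RowP (popChars p) := by
              rw [hr]
              conv_lhs => rw [hpw]
              exact rowP_space_tail hws
            have hfold1 := foldl_feedB_spec pvMARK (popChars p) sel row hsel' hrow'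
            have hfold2 := foldl_feedB_spec' X4 (pvMARK.foldl feedB (popChars p, sel, row))
              (by rw [hfold1.1]; exact hfold1.2.1) (by rw [hfold1.1]; exact hfold1.2.2)
            rw [hfold1.1] at hfold2
            have hE : EndsOk ((popWsToks result ++ [pvMARK]) ++ [X4]) :=
              endsOk_append_nonspace hch4 hch4n
            refine ih _ ((popWsToks result ++ [pvMARK]) ++ [X4]) _ (by omega) ?_ ?_ ?_ hE
            · rw [hfold2.1]
              have hflat : (popWsToks result).flatten = popChars p := by
                rw [h1]; exact endsOk_flatten_pop he
              simp [hflat]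
            · rw [hfold2.1]; exact hfold2.2.1
            · rw [hfold2.1]; exact hfold2.2.2
          · have hinsNP : ¬ (SelP p ∧ ¬ RowP p) := by
              intro hP
              exact hins ⟨hs.mpr hP.1, fun hrw => hP.2 (hr.mp hrw)⟩
            rw [if_neg hins]
            have hres1 : (if PySem.Chars.rfind (PySem.Chars.upper p) pvSEL ≠ -1 then
                  if ¬ PySem.Chars.isIn pvROW (PySem.Chars.lower
                      (PySem.List.slice p (some (PySem.Chars.rfind (PySem.Chars.upper p) pvSEL)))) = true then
                    popWsToks result ++ [pvMARK]
                  else result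
                else result) = result := by
              by_cases hC1 : PySem.Chars.rfind (PySem.Chars.upper p) pvSEL ≠ -1
              · rw [if_pos hC1]
                rw [if_neg ?_]
                intro hC2
                exact hinsNP ((decisionA p).mp ⟨hC1, hC2⟩)
              · rw [if_neg hC1]
            rw [hres1]
            have hfold := foldl_feedB_spec X4 p sel row hs hr
            have hE : EndsOk (result ++ [X4]) := endsOk_append_nonspace hch4 hch4n
            refine ih _ (result ++ [X4]) _ (by omega) ?_ ?_ ?_ hE
            · rw [hfold.1, h1]; simp
            · rw [hfold.1]; exact hfold.2.1
            · rw [hfold.1]; exact hfold.2.2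
        · rw [if_neg hb, if_neg (fun hx => hb (hb_iff.mp hx))]
          exact hsingle
      · rw [if_neg hf, if_neg (fun hx => hf (hcond_iff.mp hx))]
        exact hsingle

theorem selP_nil : ¬ SelP [] := by
  rintro ⟨s, hs⟩
  unfold OccS OccG at hs
  simp only [PySem.Chars.upper, List.map_nil, List.drop_nil] at hs
  exact absurd (List.prefix_nil.mp hs) (by decide)

theorem rowP_nil : ¬ RowP [] := by
  rintro ⟨q, hq, _⟩
  unfold OccR OccG at hq
  simp only [PySem.Chars.lower, List.map_nil, List.drop_nil] at hq
  exact absurd (List.prefix_nil.mp hq) (by decide)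

-- ===== VERDICT (by name: the statement is the Claim_ definition above) =====
theorem add_row_id_to_all_selects_py_spec : Claim_equal_add_row_id_to_all_selects_py := by
  intro sql _
  show add_row_id_to_all_selects_py sql = add_row_id_to_all_selects_py_alt sql
  unfold add_row_id_to_all_selects_py add_row_id_to_all_selects_py_alt
  rw [join_nil_eq_flatten]
  congr 1
  symm
  exact loop_eq sql.toList sql.toList.length 0 [] ([], false, false) (by omega) rfl
    (by simpa using selP_nil) (by simpa using rowP_nil) endsOk_nil
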